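-- pv_equiv track=rewrite | github.com/noahostle/ACO-train-routing-optimisation | multi.py | calculate_delays
-- ===== SOURCE A (Python) =====
-- def calculate_delays(paths, num_stations):
-- 	#add a delay if two trains are at the same index
-- 	delays=0
-- 	max_length = max(len(path) for path in paths)
--
-- 	for station_index in range(max_length):
-- 		stations_at_index = [path[station_index] for path in paths if station_index < len(path)]
-- 		if len(stations_at_index) != len(set(stations_at_index)):
-- 			delays += 1
-- 	return delays
-- ===== SOURCE B (Python) =====
-- def calculate_delays(paths, num_stations):
--     # Path-major single pass: remember (index, station) pairs already seen;
--     # a repeated pair marks its index as a collision index.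
--     seen = set()
--     collisions = set()
--     for path in paths:
--         for i, station in enumerate(path):
--             key = (i, station)
--             if key in seen:
--                 collisions.add(i)
--             else:
--                 seen.add(key)
--     return len(collisions)
-- ===== Notes on version B (the rewrite author's own statement) =====
-- stated objective: alternative
-- what changed: Index-major double scan (for each index, rebuild the list of stations at that index across all paths and compare with its set) is replaced by one path-major pass over (index, station) pairs keeping a seen-set and a collision-index set.
import Mathlib
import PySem

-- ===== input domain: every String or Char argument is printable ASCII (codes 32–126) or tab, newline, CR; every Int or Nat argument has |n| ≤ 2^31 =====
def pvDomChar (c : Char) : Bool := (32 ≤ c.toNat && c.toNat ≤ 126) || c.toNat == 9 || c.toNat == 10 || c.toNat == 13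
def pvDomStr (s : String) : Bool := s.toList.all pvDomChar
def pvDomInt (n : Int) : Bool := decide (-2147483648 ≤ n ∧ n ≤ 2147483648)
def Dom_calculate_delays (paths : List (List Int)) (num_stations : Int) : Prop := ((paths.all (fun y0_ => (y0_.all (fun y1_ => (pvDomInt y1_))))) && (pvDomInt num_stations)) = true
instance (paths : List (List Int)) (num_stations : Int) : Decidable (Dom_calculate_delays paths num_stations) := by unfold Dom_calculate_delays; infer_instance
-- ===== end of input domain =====

-- B replaces A's index-major rescan of all paths at every index by one path-major pass
-- over (index, station) pairs with a seen-set and a collision-index set (objective: alternative).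

-- ===== PORT A =====
-- literal port of A; `max(len(path) for path in paths)` raises ValueError on paths = [],
-- excluded by Pre_; the port returns 0 there (unclaimed).
def calculate_delays (paths : List (List Int)) (num_stations : Int) : Int :=
  match PySem.List.max? (paths.map (fun path => (path.length : Int))) (fun x => x) with
  | none => 0
  | some max_length =>
    (PySem.List.pyRange 0 max_length 1).foldl (fun delays station_index =>
      let stations_at_index : List Int := paths.filterMap (fun path =>
        if station_index < (path.length : Int) then PySem.List.pyGet? path station_index else none)
      if stations_at_index.length ≠ (PySem.Set.ofList stations_at_index).length then delays + 1
      else delays) 0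

-- ===== PORT B =====
def pvStepB (st : PySem.Set (Int × Int) × PySem.Set Int) (q : Int × Int) :
    PySem.Set (Int × Int) × PySem.Set Int :=
  if PySem.Set.contains st.1 q then (st.1, PySem.Set.add st.2 q.1)
  else (PySem.Set.add st.1 q, st.2)

def calculate_delays_alt (paths : List (List Int)) (num_stations : Int) : Int :=
  let fin := paths.foldl (fun st path => (PySem.List.enumerate path 0).foldl pvStepB st)
    (PySem.Set.empty, PySem.Set.empty)
  (fin.2.length : Int)

-- ===== PRECONDITION & SPEC =====
-- Pre_ excludes only paths = [], where A raises ValueError (max() of an empty sequence).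
def Pre_calculate_delays (paths : List (List Int)) (num_stations : Int) : Prop := paths ≠ []
instance (paths : List (List Int)) (num_stations : Int) : Decidable (Pre_calculate_delays paths num_stations) := by unfold Pre_calculate_delays; infer_instance
def pvWitness_calculate_delays : List (List Int) × Int := ([[1, 2], [1, 3]], 4)

def Spec_calculate_delays (paths : List (List Int)) (num_stations : Int) (out : Int) : Prop := out = calculate_delays_alt paths num_stations
instance (paths : List (List Int)) (num_stations : Int) (out : Int) : Decidable (Spec_calculate_delays paths num_stations out) := by unfold Spec_calculate_delays; infer_instance

-- ===== CLAIM (what is proved, stated in full; the proofs are below) =====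
def Claim_equal_calculate_delays : Prop := ∀ (paths : List (List Int)) (num_stations : Int), Dom_calculate_delays paths num_stations → Pre_calculate_delays paths num_stations → Spec_calculate_delays paths num_stations (calculate_delays paths num_stations)

-- ===== LEMMAS AND PROOFS =====

-- the flattened stream of (index, station) pairs B walks over
def pvPairs (paths : List (List Int)) : List (Int × Int) :=
  paths.flatMap (fun p => PySem.List.enumerate p 0)

-- the stations at index i, exactly as A's comprehension builds them
def pvStations (paths : List (List Int)) (i : Int) : List Int :=
  paths.filterMap (fun path =>
    if i < (path.length : Int) then PySem.List.pyGet? path i else none)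

def pvInv (ps : List (Int × Int)) (st : PySem.Set (Int × Int) × PySem.Set Int) : Prop :=
  (∀ q, q ∈ st.1 ↔ q ∈ ps) ∧ (∀ i, i ∈ st.2 ↔ ∃ s, 2 ≤ ps.count (i, s)) ∧ st.2.Nodup

theorem pvInv_step (ps : List (Int × Int)) (st : PySem.Set (Int × Int) × PySem.Set Int)
    (q : Int × Int) (h : pvInv ps st) : pvInv (ps ++ [q]) (pvStepB st q) := by
  obtain ⟨h1, h2, h3⟩ := h
  unfold pvStepB
  by_cases hc : q ∈ st.1
  · rw [if_pos ((PySem.Set.contains_iff st.1 q).mpr hc)]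
    have hqps : q ∈ ps := (h1 q).mp hc
    refine ⟨fun q' => ?_, fun i => ?_, PySem.Set.nodup_add _ _ h3⟩
    · simp only [List.mem_append, List.mem_singleton, h1]
      constructor
      · exact Or.inl
      · rintro (h | rfl) <;> [exact h; exact hqps]
    · rw [PySem.Set.mem_add]
      constructor
      · rintro (hi | rfl)
        · obtain ⟨s, hs⟩ := (h2 i).mp hi
          exact ⟨s, le_trans hs (by simp [List.count_append])⟩
        · refine ⟨q.2, ?_⟩
          have : 1 ≤ ps.count (q.1, q.2) := List.one_le_count_iff.mpr (by simpa using hqps)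
          simp only [List.count_append]
          have : (q.1, q.2) = q := rfl
          simp [this]
          omega
      · rintro ⟨s, hs⟩
        rw [List.count_append] at hs
        by_cases hq : (i, s) = q
        · exact Or.inr (congrArg Prod.fst hq)
        · left
          have hz : List.count (i, s) [q] = 0 := by
            simp [List.count_singleton]
            exact fun h => hq h.symm
          exact (h2 i).mpr ⟨s, by omega⟩
  · rw [if_neg (by simpa [PySem.Set.contains_iff])]
    have hqps : q ∉ ps := fun hmem => hc ((h1 q).mpr hmem)
    refine ⟨fun q' => ?_, fun i => ?_, h3⟩
    · rw [PySem.Set.mem_add]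
      simp [h1]
    · rw [h2 i]
      constructor
      · rintro ⟨s, hs⟩
        exact ⟨s, le_trans hs (by simp [List.count_append])⟩
      · rintro ⟨s, hs⟩
        rw [List.count_append] at hs
        by_cases hq : (i, s) = q
        · exfalso
          subst hq
          have hone : List.count (i, s) [(i, s)] = 1 := by simp
          have : 1 ≤ ps.count (i, s) := by omega
          exact hqps (List.one_le_count_iff.mp this)
        · have hz : List.count (i, s) [q] = 0 := by
            simp [List.count_singleton]
            exact fun h => hq h.symm
          exact ⟨s, by omega⟩

theorem pvInv_foldl (ps : List (Int × Int)) :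
    pvInv ps (ps.foldl pvStepB (PySem.Set.empty, PySem.Set.empty)) := by
  induction ps using List.reverseRecOn with
  | nil => exact ⟨by simp [PySem.Set.empty], by simp [PySem.Set.empty], by simp [PySem.Set.empty]⟩
  | append_singleton l q ih =>
    rw [List.foldl_append]
    exact pvInv_step l _ q ih

theorem pvFold_flat (paths : List (List Int)) (init : PySem.Set (Int × Int) × PySem.Set Int) :
    paths.foldl (fun st path => (PySem.List.enumerate path 0).foldl pvStepB st) init
      = (pvPairs paths).foldl pvStepB init := by
  induction paths generalizing init with
  | nil => rfl
  | cons p rest ih => simp [pvPairs, List.foldl_append, ih, List.flatMap_cons] at *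

theorem pvCount_enumerate (p : List Int) (a i s : Int) :
    (PySem.List.enumerate p a).count (i, s)
      = (if a ≤ i ∧ i < a + p.length then (if p[(i - a).toNat]? = some s then 1 else 0) else 0) := by
  induction p generalizing a with
  | nil =>
    simp only [PySem.List.enumerate_nil, List.count_nil, List.length_nil]
    rw [eq_comm]
    rw [if_neg (by omega)]
  | cons x t ih =>
    rw [PySem.List.enumerate_cons, List.count_cons, ih (a + 1)]
    simp only [List.length_cons, beq_iff_eq, Prod.mk.injEq]
    by_cases hia : i = a
    · subst hia
      push_cast
      rw [if_neg (show ¬((i : Int) + 1 ≤ i ∧ i < i + 1 + (t.length : Int)) by omega)]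
      rw [if_pos (show (i : Int) ≤ i ∧ i < i + ((t.length : Int) + 1) by constructor <;> omega)]
      have h0 : ((i : Int) - i).toNat = 0 := by omega
      rw [h0, List.getElem?_cons_zero]
      by_cases hxs : x = s
      · subst hxs; simp
      · simp only [hxs]
        rw [if_neg (show ¬(some x = some s) by simpa using hxs)]
        simp
    · rw [if_neg (show ¬(a = i ∧ x = s) from fun h => hia h.1.symm)]
      push_cast
      by_cases hr : a + 1 ≤ i ∧ i < a + 1 + (t.length : Int)
      · rw [if_pos hr, if_pos (show a ≤ i ∧ i < a + ((t.length : Int) + 1) by constructor <;> omega)]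
        have h1 : (i - a).toNat = (i - (a + 1)).toNat + 1 := by omega
        rw [h1, List.getElem?_cons_succ]
        omega
      · rw [if_neg hr, if_neg (show ¬(a ≤ i ∧ i < a + ((t.length : Int) + 1)) by omega)]

theorem pvF_eq (p : List Int) (k : Nat) :
    (if (k : Int) < (p.length : Int) then PySem.List.pyGet? p (k : Int) else none) = p[k]? := by
  by_cases h : k < p.length
  · rw [if_pos (by exact_mod_cast h), PySem.List.pyGet?_natCast]
  · rw [if_neg (by exact_mod_cast h), eq_comm, List.getElem?_eq_none_iff]
    omega

theorem pvCount_pairs (paths : List (List Int)) (k : Nat) (s : Int) :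
    (pvPairs paths).count ((k : Int), s) = (pvStations paths (k : Int)).count s := by
  induction paths with
  | nil => rfl
  | cons p r ih =>
    simp only [pvPairs, pvStations, List.flatMap_cons, List.filterMap_cons, List.count_append] at ih ⊢
    rw [ih, pvCount_enumerate]
    rw [pvF_eq p k]
    by_cases h : k < p.length
    · have : p[k]? = some p[k] := List.getElem?_eq_getElem h
      rw [this]
      rw [if_pos (by omega)]
      have h0 : ((k : Int) - 0).toNat = k := by omega
      rw [h0, this, List.count_cons]
      by_cases hxs : p[k] = s
      · simp [hxs]
        omega
      · rw [if_neg (show ¬(some p[k] = some s) by simpa using hxs)]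
        rw [if_neg (show ¬(p[k] == s) = true by simpa using hxs)]
        omega
    · have hnone : p[k]? = none := by rw [List.getElem?_eq_none_iff]; omega
      rw [hnone]
      rw [if_neg (by omega)]
      simp

theorem pvSetLen_iff (xs : List Int) :
    (PySem.Set.ofList xs).length = xs.length ↔ xs.Nodup := by
  have hperm : (PySem.Set.ofList xs).Perm xs.dedup :=
    (List.perm_ext_iff_of_nodup (PySem.Set.nodup_ofList xs) xs.nodup_dedup).mpr
      (fun a => by rw [PySem.Set.mem_ofList, List.mem_dedup])
  rw [hperm.length_eq]
  constructor
  · intro h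
    rw [← List.dedup_eq_self]
    exact xs.dedup_sublist.eq_of_length h
  · intro h
    rw [List.dedup_eq_self.mpr h]

theorem pvMain (paths : List (List Int)) (num_stations : Int) (hpre : paths ≠ []) :
    calculate_delays paths num_stations = calculate_delays_alt paths num_stations := by
  -- name the pair stream and the final state
  obtain ⟨hseen, hcoll, hnd⟩ := pvInv_foldl (pvPairs paths)
  -- A's max exists
  obtain ⟨ml, hml⟩ : ∃ ml, PySem.List.max? (paths.map (fun path => (path.length : Int))) (fun x => x) = some ml := by
    cases hmax : PySem.List.max? (paths.map (fun path => (path.length : Int))) (fun x => x) with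
    | none => exact absurd (List.map_eq_nil_iff.mp ((PySem.List.max?_eq_none_iff _ _).mp hmax)) hpre
    | some m => exact ⟨m, rfl⟩
  have hub : ∀ p ∈ paths, (p.length : Int) ≤ ml := by
    intro p hp
    simpa using PySem.List.max?_isMax hml _ (List.mem_map_of_mem hp)
  -- the per-index duplicate predicate (A's test)
  have hA : calculate_delays paths num_stations
      = 0 + ((PySem.List.pyRange 0 ml 1).countP (fun i => decide ((pvStations paths i).length ≠ (PySem.Set.ofList (pvStations paths i)).length)) : Int) := by
    simp only [calculate_delays, hml]
    exact PySem.List.foldl_ite_add_one (fun i => (pvStations paths i).length ≠ (PySem.Set.ofList (pvStations paths i)).length) _ _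
  -- the collision set is a permutation of the indices A counts
  have hperm : ((pvPairs paths).foldl pvStepB (PySem.Set.empty, PySem.Set.empty)).2.Perm
      ((PySem.List.pyRange 0 ml 1).filter (fun i => decide ((pvStations paths i).length ≠ (PySem.Set.ofList (pvStations paths i)).length))) := by
    refine (List.perm_ext_iff_of_nodup hnd (List.Nodup.filter _ (PySem.List.nodup_pyRange_one 0 ml))).mpr ?_
    intro i
    rw [hcoll i, List.mem_filter, PySem.List.mem_pyRange_one]
    constructor
    · rintro ⟨s, hs⟩
      have hmem : (i, s) ∈ pvPairs paths := List.count_pos_iff.mp (by omega)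
      obtain ⟨p, hp, hin⟩ := List.mem_flatMap.mp hmem
      obtain ⟨k, hk, hik⟩ := (PySem.List.mem_enumerate_iff _ _ _).mp hin
      have hik1 : i = (k : Int) := by simpa using congrArg Prod.fst hik
      have hi0 : 0 ≤ i := by omega
      have hilt : i < ml := lt_of_lt_of_le (by omega : i < (p.length : Int)) (hub p hp)
      refine ⟨⟨hi0, hilt⟩, ?_⟩
      rw [decide_eq_true_iff]
      intro hlen
      have hnodup : (pvStations paths i).Nodup := (pvSetLen_iff _).mp hlen.symm
      have hcnt : (pvStations paths i).count s = (pvPairs paths).count (i, s) := by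
        rw [hik1, pvCount_pairs]
      rw [List.nodup_iff_count_le_one] at hnodup
      have := hnodup s
      omega
    · rintro ⟨⟨hi0, hilt⟩, hP⟩
      rw [decide_eq_true_iff] at hP
      have hnotnodup : ¬ (pvStations paths i).Nodup := fun hn => hP ((pvSetLen_iff _).mpr hn).symm
      rw [List.nodup_iff_count_le_one] at hnotnodup
      push Not at hnotnodup
      obtain ⟨s, hs⟩ := hnotnodup
      refine ⟨s, ?_⟩
      have : i = ((i.toNat : Nat) : Int) := by omega
      rw [this, pvCount_pairs, ← this]
      omega
  -- conclude
  rw [hA]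
  show _ = ((((paths.foldl (fun st path => (PySem.List.enumerate path 0).foldl pvStepB st)
    (PySem.Set.empty, PySem.Set.empty)).2.length : Nat) : Int))
  rw [pvFold_flat, hperm.length_eq, List.countP_eq_length_filter]
  omega

-- ===== VERDICT (by name: the statement is the Claim_ definition above) =====
theorem calculate_delays_spec : Claim_equal_calculate_delays := by
  intro paths num_stations _ hpre
  exact pvMain paths num_stations hpre
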